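-- pv_equiv track=rewrite | github.com/piccolomo/plotext | plotext/_utility.py | fit_sizes
-- ===== SOURCE A (Python) =====
-- def fit_sizes(sizes, size_max): # honestly forgot the point of this function: yeeeeei :-) but it is useful - probably assumes all sizes not None (due to set_sizes) and reduces those that exceed size_max from last one to first
--     bins = len(sizes)
--     s = bins - 1
--     #while (sum(sizes) != size_max if not_less else sum(sizes) > size_max) and s >= 0:
--     while sum(sizes) > size_max and s >= 0:
--         other_sizes = sum([sizes[i] for i in range(bins) if i != s])
--         sizes[s] = max(size_max - other_sizes, 0)
--         s -= 1
--     return sizes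
-- ===== SOURCE B (Python) =====
-- def fit_sizes(sizes, size_max):
--     # Closed form instead of A's repeated clamp-and-resum loop: the result keeps
--     # the longest prefix whose running sum fits within size_max, caps the next
--     # element to exactly exhaust the budget, and zeroes everything after it.
--     # Mutates `sizes` in place, like the original.
--     if sum(sizes) <= size_max:
--         return sizes
--     j = -1          # last index whose preceding prefix-sum fits (-1 if none)
--     cap = 0
--     p = 0
--     for i in range(len(sizes)):
--         if p <= size_max:
--             j, cap = i, size_max - p
--         p += sizes[i]
--     for i in range(len(sizes)):
--         if i > j:
--             sizes[i] = 0
--         elif i == j: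
--             sizes[i] = cap
--     return sizes
-- ===== Notes on version B (the rewrite author's own statement) =====
-- stated objective: alternative
-- what changed: Replaced A's iterative clamp-and-resum while-loop with a closed form: one forward prefix-sum pass finds the last index whose preceding prefix fits in size_max, then the answer is written directly as that prefix, one capped element exhausting the budget, and zeros.
import Mathlib
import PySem

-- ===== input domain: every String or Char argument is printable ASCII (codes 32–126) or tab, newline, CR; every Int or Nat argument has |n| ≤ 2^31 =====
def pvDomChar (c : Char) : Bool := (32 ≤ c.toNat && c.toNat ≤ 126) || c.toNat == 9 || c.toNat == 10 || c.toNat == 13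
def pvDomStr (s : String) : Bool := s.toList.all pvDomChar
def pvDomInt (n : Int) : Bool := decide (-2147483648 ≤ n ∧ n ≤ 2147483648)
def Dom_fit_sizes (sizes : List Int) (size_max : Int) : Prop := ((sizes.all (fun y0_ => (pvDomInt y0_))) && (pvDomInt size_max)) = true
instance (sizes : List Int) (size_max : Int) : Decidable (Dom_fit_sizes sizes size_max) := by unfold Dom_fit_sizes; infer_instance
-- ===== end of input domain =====

-- B replaces A's clamp-and-resum while-loop by a closed form (prefix-sum pass, then
-- direct construction); equivalence is about the RETURN value (both Pythons mutate
-- `sizes` in place the same way).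

-- ===== PORT A =====
-- A's while-loop: fuel k means the Python variable s = k-1; at fuel 0 (s = -1) the loop exits.
def fitA_go (size_max : Int) (bins : Nat) (sizes : List Int) : Nat → List Int
  | 0 => sizes
  | k+1 =>
    if sizes.sum > size_max then
      -- other_sizes = sum([sizes[i] for i in range(bins) if i != s]), s = k
      let other := (((List.range bins).filter (fun i => i ≠ k)).map (fun i => sizes.getD i 0)).sum
      fitA_go size_max bins (sizes.set k (max (size_max - other) 0)) k
    else sizes

def fit_sizes (sizes : List Int) (size_max : Int) : List Int :=
  fitA_go size_max sizes.length sizes sizes.length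

-- ===== PORT B =====
-- first for-loop of Source B: fold over (value, index) pairs, state (p, j, cap)
def fitB_scan (size_max : Int) (sizes : List Int) : Int × Int × Int :=
  sizes.zipIdx.foldl
    (fun (st : Int × Int × Int) (vi : Int × Nat) =>
      let jc := if st.1 ≤ size_max then ((vi.2 : Int), size_max - st.1) else st.2
      (st.1 + vi.1, jc))
    (0, -1, 0)

def fit_sizes_alt (sizes : List Int) (size_max : Int) : List Int :=
  if sizes.sum ≤ size_max then sizes
  else
    let st := fitB_scan size_max sizes
    let j := st.2.1
    let cap := st.2.2
    -- second for-loop of Source B: rewrite each position from its index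
    sizes.zipIdx.map (fun vi : Int × Nat =>
      if (vi.2 : Int) > j then 0 else if (vi.2 : Int) = j then cap else vi.1)

-- ===== PRECONDITION & SPEC =====
def Spec_fit_sizes (sizes : List Int) (size_max : Int) (out : List Int) : Prop := out = fit_sizes_alt sizes size_max
instance (sizes : List Int) (size_max : Int) (out : List Int) : Decidable (Spec_fit_sizes sizes size_max out) := by unfold Spec_fit_sizes; infer_instance

-- ===== CLAIM (what is proved, stated in full; the proofs are below) =====
def Claim_equal_fit_sizes : Prop := ∀ (sizes : List Int) (size_max : Int), Dom_fit_sizes sizes size_max → Spec_fit_sizes sizes size_max (fit_sizes sizes size_max)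

-- ===== LEMMAS AND PROOFS =====

-- prefix sum of the first k elements
def pfx (xs : List Int) (k : Nat) : Int := (xs.take k).sum

-- last j < k with pfx j ≤ size_max, together with its cap (none if no such j)
def lastFit (size_max : Int) (xs : List Int) : Nat → Option (Nat × Int)
  | 0 => none
  | k+1 => if pfx xs k ≤ size_max then some (k, size_max - pfx xs k) else lastFit size_max xs k

-- the common closed form both ports reach
def closedF (xs : List Int) (n : Nat) : Option (Nat × Int) → List Int
  | none => List.replicate n 0
  | some (j, cap) => xs.take j ++ cap :: List.replicate (n - j - 1) 0

lemma pfx_succ (xs : List Int) (k : Nat) (hk : k < xs.length) :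
    pfx xs (k+1) = pfx xs k + xs[k] := by
  exact List.sum_take_succ xs k hk

lemma lastFit_lt (size_max : Int) (xs : List Int) :
    ∀ k j cap, lastFit size_max xs k = some (j, cap) → j < k := by
  intro k
  induction k with
  | zero => intro j cap h; simp [lastFit] at h
  | succ k ih =>
    intro j cap h
    rw [lastFit] at h
    split_ifs at h with hc
    · injection h with h'; injection h' with h1 h2; omega
    · exact Nat.lt_succ_of_lt (ih j cap h)

-- sum of f over range n without index s equals the full sum minus f s
lemma sum_filter_ne (f : Nat → Int) : ∀ (n s : Nat), s < n →
    (((List.range n).filter (fun i => i ≠ s)).map f).sum = ((List.range n).map f).sum - f s := by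
  intro n
  induction n with
  | zero => intro s hs; omega
  | succ n ih =>
    intro s hs
    rw [List.range_succ, List.filter_append, List.map_append, List.sum_append,
        List.map_append, List.sum_append]
    rcases Nat.lt_succ_iff_lt_or_eq.mp hs with h | h
    · have hne : n ≠ s := by omega
      have h1 : List.filter (fun i => decide (i ≠ s)) [n] = [n] := by simp [hne]
      rw [h1, ih s h]
      simp; ring
    · subst h
      have h1 : List.filter (fun i => decide (i ≠ s)) [s] = [] := by simp
      have h2 : List.filter (fun i => decide (i ≠ s)) (List.range s) = List.range s :=
        List.filter_eq_self.mpr (by intro a ha; simp at ha ⊢; omega)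
      rw [h1, h2]; simp

lemma map_getD_range (xs : List Int) : (List.range xs.length).map (fun i => xs.getD i 0) = xs := by
  apply List.ext_getElem
  · simp
  · intro i h1 h2
    simp [List.getD_eq_getElem?_getD, h2]

-- A's loop exits immediately when the sum already fits
lemma fitA_stop (size_max : Int) (n : Nat) (ys : List Int) (h : ¬ ys.sum > size_max) :
    ∀ k, fitA_go size_max n ys k = ys := by
  intro k
  cases k with
  | zero => rw [fitA_go]
  | succ k => rw [fitA_go, if_neg h]

-- the mid-loop state of A: first k original entries, zeros after
def stA (xs : List Int) (n k : Nat) : List Int := xs.take k ++ List.replicate (n - k) 0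

lemma stA_sum (xs : List Int) (n k : Nat) : (stA xs n k).sum = pfx xs k := by
  simp [stA, pfx]

-- main invariant: from state stA with over-budget prefix, A's loop reaches the closed form
lemma take_set (xs : List Int) (k : Nat) (hk : k < xs.length) (v : Int) :
    (xs.take (k+1)).set k v = xs.take k ++ [v] := by
  rw [List.take_add_one, List.getElem?_eq_getElem hk]
  apply List.ext_getElem
  · simp; omega
  · intro i h1 h2
    by_cases hik : i = k
    · subst hik
      have hlt : (xs.take i).length = i := by simp; omega
      rw [List.getElem_set_self (by simp; omega), List.getElem_append_right (by omega)]
      simp [hlt]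
    · have hi : i < k := by simp at h1; omega
      rw [List.getElem_set_ne (by omega)]
      rw [List.getElem_append_left (by simp; omega), List.getElem_append_left (by simp; omega)]

-- main invariant: from state stA with over-budget prefix, A's loop reaches the closed form
lemma fitA_run (size_max : Int) (xs : List Int) :
    ∀ k, k ≤ xs.length → pfx xs k > size_max →
      fitA_go size_max xs.length (stA xs xs.length k) k
        = closedF xs xs.length (lastFit size_max xs k) := by
  intro k
  induction k with
  | zero =>
    intro _ _
    rw [fitA_go]
    simp [stA, lastFit, closedF]
  | succ k ih =>
    intro hk hp
    have hklt : k < xs.length := hk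
    have hsum : (stA xs xs.length (k+1)).sum = pfx xs (k+1) := stA_sum ..
    rw [fitA_go, if_pos (by rw [hsum]; exact hp)]
    have hgetD : (stA xs xs.length (k+1)).getD k 0 = xs[k] := by
      have h1 : k < (xs.take (k+1)).length := by simp; omega
      simp [stA, List.getD_eq_getElem?_getD, hklt]
    have hmap : (List.range xs.length).map (fun i => (stA xs xs.length (k+1)).getD i 0)
        = stA xs xs.length (k+1) := by
      have hlenst : (stA xs xs.length (k+1)).length = xs.length := by
        simp [stA]; omega
      have := map_getD_range (stA xs xs.length (k+1))
      rw [hlenst] at this; exact this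
    have hother :
        (((List.range xs.length).filter (fun i => i ≠ k)).map
          (fun i => (stA xs xs.length (k+1)).getD i 0)).sum = pfx xs k := by
      rw [sum_filter_ne (fun i => (stA xs xs.length (k+1)).getD i 0) xs.length k hklt, hmap, hsum]
      show pfx xs (k+1) - (stA xs xs.length (k+1)).getD k 0 = pfx xs k
      rw [hgetD, pfx_succ xs k hklt]; ring
    rw [hother]
    show fitA_go size_max xs.length
        ((stA xs xs.length (k+1)).set k (max (size_max - pfx xs k) 0)) k
      = closedF xs xs.length (lastFit size_max xs (k+1))
    have hset : ∀ v : Int, (stA xs xs.length (k+1)).set k v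
        = xs.take k ++ v :: List.replicate (xs.length - k - 1) 0 := by
      intro v
      have h1 : k < (xs.take (k+1)).length := by simp; omega
      rw [stA, List.set_append, if_pos h1, take_set xs k hklt v, List.append_assoc]
      have : xs.length - (k+1) = xs.length - k - 1 := by omega
      rw [this, List.singleton_append]
    by_cases hc : pfx xs k ≤ size_max
    · -- loop will stop right after this assignment
      have hmax : max (size_max - pfx xs k) 0 = size_max - pfx xs k := by omega
      rw [hmax, hset]
      have hs2 : (xs.take k ++ (size_max - pfx xs k) :: List.replicate (xs.length - k - 1) 0).sum
          = size_max := by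
        simp [pfx]
      rw [fitA_stop size_max xs.length _ (by omega) k]
      rw [lastFit, if_pos hc]
      rfl
    · -- element zeroed, loop continues
      have hmax : max (size_max - pfx xs k) 0 = 0 := by omega
      rw [hmax, hset]
      have hst : xs.take k ++ (0:Int) :: List.replicate (xs.length - k - 1) 0 = stA xs xs.length k := by
        rw [stA]
        congr 1
        conv_rhs => rw [show xs.length - k = (xs.length - k - 1) + 1 from by omega, List.replicate_succ]
      rw [hst, ih (by omega) (by omega), lastFit, if_neg hc]

-- B's scan fold computes exactly (sum, lastFit rendered as an (Int × Int) pair)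
def jcOf : Option (Nat × Int) → Int × Int
  | none => (-1, 0)
  | some (j, cap) => ((j : Int), cap)

lemma pfx_append (xs : List Int) (v : Int) (k : Nat) (hk : k ≤ xs.length) :
    pfx (xs ++ [v]) k = pfx xs k := by
  simp [pfx, List.take_append_of_le_length hk]

lemma lastFit_append (size_max : Int) (xs : List Int) (v : Int) :
    ∀ k, k ≤ xs.length → lastFit size_max (xs ++ [v]) k = lastFit size_max xs k := by
  intro k
  induction k with
  | zero => intro _; rfl
  | succ k ih =>
    intro hk
    rw [lastFit, lastFit, pfx_append xs v k (by omega), ih (by omega)]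

lemma fitB_scan_spec (size_max : Int) (xs : List Int) :
    fitB_scan size_max xs = (xs.sum, jcOf (lastFit size_max xs xs.length)) := by
  induction xs using List.reverseRecOn with
  | nil => rfl
  | append_singleton ys v ih =>
    rw [fitB_scan, List.zipIdx_append, List.foldl_append]
    rw [fitB_scan] at ih
    rw [ih]
    have hpfx : pfx (ys ++ [v]) ys.length = ys.sum := by
      simp [pfx, List.take_append_of_le_length (le_refl ys.length)]
    have hlen : (ys ++ [v]).length = ys.length + 1 := by simp
    rw [hlen, lastFit, hpfx, lastFit_append size_max ys v ys.length (le_refl _)]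
    by_cases hc : ys.sum ≤ size_max
    · simp [hc, jcOf]
    · simp [hc, jcOf]

-- B's rewriting pass produces the closed form
lemma map_closed (xs : List Int) (o : Option (Nat × Int))
    (ho : ∀ j cap, o = some (j, cap) → j < xs.length) :
    xs.zipIdx.map (fun vi : Int × Nat =>
      if (vi.2 : Int) > (jcOf o).1 then 0 else if (vi.2 : Int) = (jcOf o).1 then (jcOf o).2 else vi.1)
      = closedF xs xs.length o := by
  apply List.ext_getElem
  · cases o with
    | none => simp [closedF]
    | some jc =>
      obtain ⟨j, cap⟩ := jc
      have := ho j cap rfl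
      simp [closedF]
      omega
  · intro i h1 h2
    rw [List.getElem_map, List.getElem_zipIdx]
    have hi : i < xs.length := by simpa using h1
    cases o with
    | none =>
      have : ((0 + i : Nat) : Int) > (jcOf Option.none).1 := by simp [jcOf]; omega
      rw [if_pos this]
      simp [closedF] at h2 ⊢
    | some jc =>
      obtain ⟨j, cap⟩ := jc
      have hj : j < xs.length := ho j cap rfl
      have hjtake : (xs.take j).length = j := by simp; omega
      rcases lt_trichotomy i j with h | h | h
      · have c1 : ¬ (((0 + i : Nat) : Int) > (jcOf (some (j, cap))).1) := by simp [jcOf]; omega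
        have c2 : ¬ (((0 + i : Nat) : Int) = (jcOf (some (j, cap))).1) := by simp [jcOf]; omega
        rw [if_neg c1, if_neg c2]
        simp only [closedF]
        rw [List.getElem_append_left (by omega), List.getElem_take]
      · subst h
        have c1 : ¬ (((0 + i : Nat) : Int) > (jcOf (some (i, cap))).1) := by simp [jcOf]
        have c2 : ((0 + i : Nat) : Int) = (jcOf (some (i, cap))).1 := by simp [jcOf]
        rw [if_neg c1, if_pos c2]
        simp only [closedF]
        rw [List.getElem_append_right (by omega)]
        simp [jcOf, hjtake]
      · have c1 : ((0 + i : Nat) : Int) > (jcOf (some (j, cap))).1 := by simp [jcOf]; omega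
        rw [if_pos c1]
        simp only [closedF]
        rw [List.getElem_append_right (by omega)]
        have hmin : i - min j xs.length = (i - j - 1) + 1 := by omega
        simp [hmin]

-- ===== VERDICT (by name: the statement is the Claim_ definition above) =====
theorem fit_sizes_spec : Claim_equal_fit_sizes := by
  intro sizes size_max _
  show fit_sizes sizes size_max = fit_sizes_alt sizes size_max
  rw [fit_sizes, fit_sizes_alt]
  by_cases h : sizes.sum ≤ size_max
  · rw [if_pos h, fitA_stop size_max sizes.length sizes (by omega)]
  · rw [if_neg h]
    have hst : stA sizes sizes.length sizes.length = sizes := by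
      simp [stA]
    have hrun := fitA_run size_max sizes sizes.length (le_refl _)
      (by simp [pfx]; omega)
    rw [hst] at hrun
    rw [hrun, fitB_scan_spec]
    exact (map_closed sizes (lastFit size_max sizes sizes.length)
      (fun j cap hj => lastFit_lt size_max sizes sizes.length j cap hj)).symm
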